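-- pv_equiv track=rewrite | github.com/pranavnbapat/opensearch_fastapi_v2 | services/neural_search_relevant_advanced.py | _parse_project_filters
-- ===== SOURCE A (Python) =====
-- from typing import List, Optional, Dict, Any, Union, Tuple
--
-- def _normalize_term(token: str) -> str:
--     token = (token or "").strip()
--     if len(token) >= 2 and token[0] == '"' and token[-1] == '"':
--         token = token[1:-1].strip()
--     return token
--
-- def _parse_project_filters(tokens: List[str]) -> Tuple[List[str], List[str]]:
--     project_filters: List[str] = []
--     cleaned: List[str] = []
--     i = 0
--
--     while i < len(tokens):
--         token = tokens[i]
--         lower = token.lower()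
--         if lower in {"-project", "--project"}:
--             i += 1
--             if i < len(tokens):
--                 value = _normalize_term(tokens[i])
--                 if value:
--                     project_filters.append(value)
--             i += 1
--             continue
--         cleaned.append(token)
--         i += 1
--
--     return cleaned, project_filters
-- ===== SOURCE B (Python) =====
-- from typing import List, Tuple
--
-- KEYWORDS = {"-project", "--project"}
--
-- def _normalize_term(token: str) -> str:
--     token = (token or "").strip()
--     if len(token) >= 2 and token[0] == '"' and token[-1] == '"':
--         token = token[1:-1].strip()
--     return token
--
-- def _parse_project_filters(tokens: List[str]) -> Tuple[List[str], List[str]]: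
--     # Segment-based: repeatedly locate the next keyword, copy the whole prefix
--     # into cleaned in one extend, consume the value token, and continue on the
--     # remaining suffix. No per-token state flag.
--     cleaned: List[str] = []
--     project_filters: List[str] = []
--     rest = tokens
--     while True:
--         idx = next((j for j, t in enumerate(rest) if t.lower() in KEYWORDS), None)
--         if idx is None:
--             cleaned.extend(rest)
--             return cleaned, project_filters
--         cleaned.extend(rest[:idx])
--         if idx + 1 < len(rest):
--             value = _normalize_term(rest[idx + 1])
--             if value:
--                 project_filters.append(value)
--         rest = rest[idx + 2:]
-- ===== Notes on version B (the rewrite author's own statement) =====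
-- stated objective: alternative
-- what changed: Replaced the per-token index/lookahead scan by a segment-splitting algorithm: repeatedly find the next keyword occurrence, bulk-copy the prefix into cleaned, take the following token as the filter value, and recurse on the suffix.
import Mathlib
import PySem

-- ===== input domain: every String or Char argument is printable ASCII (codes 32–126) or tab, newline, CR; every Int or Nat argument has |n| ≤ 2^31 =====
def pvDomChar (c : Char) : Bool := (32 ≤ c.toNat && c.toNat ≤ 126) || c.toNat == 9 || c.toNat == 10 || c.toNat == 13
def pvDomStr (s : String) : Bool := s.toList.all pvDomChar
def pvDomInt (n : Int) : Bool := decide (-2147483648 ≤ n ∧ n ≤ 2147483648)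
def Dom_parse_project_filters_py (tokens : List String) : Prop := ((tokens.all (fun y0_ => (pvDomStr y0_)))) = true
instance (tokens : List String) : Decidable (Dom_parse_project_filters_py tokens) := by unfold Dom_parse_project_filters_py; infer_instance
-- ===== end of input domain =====

-- B replaces A's per-token while/lookahead scan by a segment-splitting pass: find the next
-- keyword, bulk-copy the prefix, consume the value token, recurse on the suffix (objective: alternative).

-- shared helper _normalize_term (identical Python code in both Source A and Source B)
def normTerm (token : String) : String :=
  let t := PySem.Str.strip token
  if 2 ≤ PySem.Str.len t ∧ PySem.Str.pyGet? t 0 = some '"' ∧ PySem.Str.pyGet? t (-1) = some '"' then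
    PySem.Str.strip (PySem.Str.slice t (some 1) (some (-1)))
  else t

-- ===== PORT A =====
-- while loop transcribed as recursion over the remaining tokens; the keyword branch
-- consumes the following token (A's 'i += 1; if i < len(tokens)' lookahead) in one step.
def loopA : List String → List String × List String
  | [] => ([], [])
  | t :: rest =>
    if PySem.Str.lower t = "-project" ∨ PySem.Str.lower t = "--project" then
      match rest with
      | [] => ([], [])
      | v :: rest' =>
        let value := normTerm v
        let r := loopA rest'
        (r.1, if value ≠ "" then value :: r.2 else r.2)
    else
      let r := loopA rest
      (t :: r.1, r.2)

def parse_project_filters_py (tokens : List String) : List String × List String :=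
  loopA tokens

-- ===== PORT B =====
def isKw (t : String) : Bool := PySem.Str.lower t == "-project" || PySem.Str.lower t == "--project"

-- the 'next((j for j, t in enumerate(rest) if …), None)' search ported as List.findIdx?
-- B's while loop: each round removes idx+2 ≥ 1 elements, hence recursion on the suffix.
def loopB (rest : List String) : List String × List String :=
  match h : rest.findIdx? isKw with
  | none => (rest, [])
  | some idx =>
    let pre := rest.take idx
    let pf : List String :=
      match rest.drop (idx + 1) with
      | [] => []
      | v :: _ => let value := normTerm v; if value ≠ "" then [value] else []
    let r := loopB (rest.drop (idx + 2))
    (pre ++ r.1, pf ++ r.2)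
termination_by rest.length
decreasing_by
  have hlt : idx < rest.length := (List.findIdx?_eq_some_iff_findIdx_eq.mp h).1
  simp only [List.length_drop]
  omega

def parse_project_filters_py_alt (tokens : List String) : List String × List String :=
  loopB tokens

-- ===== PRECONDITION & SPEC =====
def Spec_parse_project_filters_py (tokens : List String) (out : List String × List String) : Prop := out = parse_project_filters_py_alt tokens
instance (tokens : List String) (out : List String × List String) : Decidable (Spec_parse_project_filters_py tokens out) := by unfold Spec_parse_project_filters_py; infer_instance

-- ===== CLAIM (what is proved, stated in full; the proofs are below) =====
def Claim_equal_parse_project_filters_py : Prop := ∀ (tokens : List String), Dom_parse_project_filters_py tokens → Spec_parse_project_filters_py tokens (parse_project_filters_py tokens)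

-- ===== LEMMAS AND PROOFS =====

theorem loopB_none (ts : List String) (h : ts.findIdx? isKw = none) : loopB ts = (ts, []) := by
  rw [loopB.eq_def]
  split <;> simp_all

theorem loopB_some (ts : List String) (i : Nat) (h : ts.findIdx? isKw = some i) :
    loopB ts = (ts.take i ++ (loopB (ts.drop (i + 2))).1,
      (match ts.drop (i + 1) with
        | [] => []
        | v :: _ => if normTerm v ≠ "" then [normTerm v] else []) ++ (loopB (ts.drop (i + 2))).2) := by
  rw [loopB.eq_def]
  split <;> simp_all

theorem loopA_eq_loopB : ∀ (n : Nat) (ts : List String), ts.length ≤ n → loopA ts = loopB ts := by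
  intro n
  induction n with
  | zero =>
    intro ts hts
    have : ts = [] := List.eq_nil_of_length_eq_zero (Nat.le_zero.mp hts)
    subst this
    rw [loopB_none [] (by simp)]
    simp [loopA]
  | succ n ih =>
    intro ts hts
    match ts with
    | [] =>
      rw [loopB_none [] (by simp)]
      simp [loopA]
    | t :: rest =>
      by_cases hk : PySem.Str.lower t = "-project" ∨ PySem.Str.lower t = "--project"
      · have hkb : isKw t = true := by simp [isKw]; tauto
        have hf : (t :: rest).findIdx? isKw = some 0 := by simp [List.findIdx?_cons, hkb]
        rw [loopB_some _ 0 hf]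
        match rest with
        | [] =>
          rw [show List.drop (0 + 2) [t] = ([] : List String) from rfl,
            show List.drop (0 + 1) [t] = ([] : List String) from rfl,
            loopB_none [] (by simp), loopA.eq_def]
          simp [hk]
        | v :: rest' =>
          have hlen : rest'.length ≤ n := by simp only [List.length_cons] at hts; omega
          simp only [List.take_zero, List.drop_succ_cons, List.drop_zero,
            List.nil_append]
          rw [← ih rest' hlen, loopA.eq_def]
          by_cases hv : normTerm v = "" <;> simp [hk, hv]
      · have hkb : isKw t = false := by
          simp only [isKw, Bool.or_eq_false_iff, beq_eq_false_iff_ne, ne_eq]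
          tauto
        rcases hrest : rest.findIdx? isKw with _ | i
        · have hf : (t :: rest).findIdx? isKw = none := by
            simp [List.findIdx?_cons, hkb, hrest]
          rw [loopB_none _ hf, loopA.eq_def]
          have hlen : rest.length ≤ n := by simp only [List.length_cons] at hts; omega
          simp [hk, ih rest hlen, loopB_none rest hrest]
        · have hf : (t :: rest).findIdx? isKw = some (i + 1) := by
            simp [List.findIdx?_cons, hkb, hrest]
          have hlen : rest.length ≤ n := by simp only [List.length_cons] at hts; omega
          rw [loopB_some _ (i + 1) hf]
          simp only [List.take_succ_cons, List.drop_succ_cons]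
          have : loopA (t :: rest) = (t :: (loopA rest).1, (loopA rest).2) := by
            conv_lhs => rw [loopA.eq_def]
            simp [hk]
          rw [this, ih rest hlen, loopB_some rest i hrest]
          simp

-- ===== VERDICT (by name: the statement is the Claim_ definition above) =====
theorem parse_project_filters_py_spec : Claim_equal_parse_project_filters_py := by
  intro tokens _
  show parse_project_filters_py tokens = parse_project_filters_py_alt tokens
  exact loopA_eq_loopB tokens.length tokens le_rfl
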